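-- pv_equiv track=rewrite | github.com/lesyeuxdelamour/PythonStudyingPTIT | PY01027.py | check
-- ===== SOURCE A (Python) =====
-- def check(s):
--     i = 0
--     while i < len(s):
--         if s[i:i + 3] == '688':
--             i += 3
--         elif s[i:i + 2] == '68':
--             i += 2
--         elif s[i:i + 1] == '6':
--             i += 1
--         else:
--             return "NO"
--     return "YES"
-- ===== SOURCE B (Python) =====
-- def check(s):
--     # single pass maintaining remaining 8-capacity after the last '6'
--     cap = 0
--     for c in s:
--         if c == '6':
--             cap = 2
--         elif c == '8' and cap > 0:
--             cap -= 1
--         else: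
--             return "NO"
--     return "YES"
-- ===== Notes on version B (the rewrite author's own statement) =====
-- stated objective: alternative
-- what changed: Replaced greedy longest-token slice matching (688/68/6 at a moving index) by a character-by-character pass maintaining an integer capacity counter of eights still allowed (set to 2 on a 6, decremented on an 8).
import Mathlib
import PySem

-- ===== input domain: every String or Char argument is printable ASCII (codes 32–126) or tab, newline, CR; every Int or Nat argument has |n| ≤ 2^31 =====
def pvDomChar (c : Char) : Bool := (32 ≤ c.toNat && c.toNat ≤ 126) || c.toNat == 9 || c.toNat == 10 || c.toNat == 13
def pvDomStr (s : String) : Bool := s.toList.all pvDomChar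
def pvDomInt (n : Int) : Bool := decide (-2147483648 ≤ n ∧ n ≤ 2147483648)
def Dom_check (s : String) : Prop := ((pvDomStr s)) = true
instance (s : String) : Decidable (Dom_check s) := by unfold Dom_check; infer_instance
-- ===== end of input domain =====

-- B replaces A's greedy token-slice matching ('688'/'68'/'6') by a one-character pass
-- with a 'remaining eights' capacity counter (objective: alternative decomposition).

-- ===== PORT A =====
-- A's while-loop over an index i, with Python string slices s[i:i+3] / s[i:i+2] / s[i:i+1]
-- ported exactly via PySem.List.slice on the code points (Chars.slice = List.slice).
def checkGo (cs : List Char) (i : Nat) : String :=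
  if i < cs.length then
    if PySem.List.slice cs (some (i : Int)) (some ((i : Int) + 3)) = ['6', '8', '8'] then
      checkGo cs (i + 3)
    else if PySem.List.slice cs (some (i : Int)) (some ((i : Int) + 2)) = ['6', '8'] then
      checkGo cs (i + 2)
    else if PySem.List.slice cs (some (i : Int)) (some ((i : Int) + 1)) = ['6'] then
      checkGo cs (i + 1)
    else "NO"
  else "YES"
termination_by cs.length - i

def check (s : String) : String := checkGo s.toList 0

-- ===== PORT B =====
-- B's for-loop over the characters with the capacity accumulator.
def checkAltGo (cs : List Char) (cap : Nat) : String :=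
  match cs with
  | [] => "YES"
  | c :: rest =>
    if c = '6' then checkAltGo rest 2
    else if c = '8' ∧ cap > 0 then checkAltGo rest (cap - 1)
    else "NO"

def check_alt (s : String) : String := checkAltGo s.toList 0

-- ===== PRECONDITION & SPEC =====
def Spec_check (s : String) (out : String) : Prop := out = check_alt s
instance (s : String) (out : String) : Decidable (Spec_check s out) := by unfold Spec_check; infer_instance

-- ===== CLAIM (what is proved, stated in full; the proofs are below) =====
def Claim_equal_check : Prop := ∀ (s : String), Dom_check s → Spec_check s (check s)

-- ===== LEMMAS AND PROOFS =====

theorem checkGo_eq (cs : List Char) (i : Nat) :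
    checkGo cs i = checkAltGo (cs.drop i) 0 := by
  rw [checkGo]
  by_cases hi : i < cs.length
  · simp only [hi, if_true]
    have h3 : PySem.List.slice cs (some (i : Int)) (some ((i : Int) + 3)) = (cs.drop i).take 3 := by
      exact_mod_cast PySem.List.slice_natCast_add cs i 3
    have h2 : PySem.List.slice cs (some (i : Int)) (some ((i : Int) + 2)) = (cs.drop i).take 2 := by
      exact_mod_cast PySem.List.slice_natCast_add cs i 2
    have h1 : PySem.List.slice cs (some (i : Int)) (some ((i : Int) + 1)) = (cs.drop i).take 1 := by
      exact_mod_cast PySem.List.slice_natCast_add cs i 1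
    rw [h3, h2, h1]
    have hd3 : cs.drop (i + 3) = (cs.drop i).drop 3 := by
      rw [List.drop_drop]
    have hd2 : cs.drop (i + 2) = (cs.drop i).drop 2 := by
      rw [List.drop_drop]
    have hd1 : cs.drop (i + 1) = (cs.drop i).drop 1 := by
      rw [List.drop_drop]
    have ih3 := checkGo_eq cs (i + 3)
    have ih2 := checkGo_eq cs (i + 2)
    have ih1 := checkGo_eq cs (i + 1)
    rw [ih3, ih2, ih1, hd3, hd2, hd1]
    match hm : cs.drop i with
    | [] =>
      exfalso
      have : cs.length ≤ i := by
        have := List.drop_eq_nil_iff.mp hm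
        omega
      omega
    | c :: rest =>
      by_cases h6 : c = '6'
      · subst h6
        match rest with
        | [] => simp [checkAltGo]
        | ['8'] => simp [checkAltGo]
        | '8' :: '8' :: r => simp [checkAltGo]
        | '8' :: c2 :: r =>
          by_cases h82 : c2 = '8'
          · subst h82; simp [checkAltGo]
          · simp [checkAltGo, h82]
        | c1 :: r =>
          by_cases h81 : c1 = '8'
          · subst h81
            match r with
            | [] => simp [checkAltGo]
            | c2 :: r' =>
              by_cases h82 : c2 = '8'
              · subst h82; simp [checkAltGo]
              · simp [checkAltGo, h82]
          · simp [checkAltGo, h81]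
      · simp [checkAltGo, h6]
  · simp only [hi, if_false]
    have : cs.drop i = [] := List.drop_eq_nil_iff.mpr (by omega)
    rw [this]
    rfl
termination_by cs.length - i

-- ===== VERDICT (by name: the statement is the Claim_ definition above) =====
theorem check_spec : Claim_equal_check := by
  intro s _
  unfold Spec_check check check_alt
  simpa using checkGo_eq s.toList 0
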